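-- pv_equiv track=rewrite | github.com/minwoosun/biomedica-etl | src/pmc_oa/build_json.py | combine_paragraphs
-- ===== SOURCE A (Python) =====
-- def combine_paragraphs(paragraphs):
--     """
--     Combines paragraphs into a dictionary.
--     """
--     combined_dict = {}
--     for entry in paragraphs:
--         for image_id, paragraph in entry.items():
--             if image_id not in combined_dict:
--                 combined_dict[image_id] = []
--             combined_dict[image_id].append(paragraph)
--     return combined_dict
-- ===== SOURCE B (Python) =====
-- def combine_paragraphs(paragraphs):
--     """
--     Combines paragraphs into a dictionary.
--     """
--     pairs = [(image_id, paragraph)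
--              for entry in paragraphs
--              for image_id, paragraph in entry.items()]
--     keys = list(dict.fromkeys(image_id for image_id, _ in pairs))
--     return {k: [p for image_id, p in pairs if image_id == k] for k in keys}
-- ===== Notes on version B (the rewrite author's own statement) =====
-- stated objective: alternative
-- what changed: Replaces the incremental dict-insert-and-append loop by a flatten-then-group pass: flatten all (image_id, paragraph) pairs, dedup the keys in first-occurrence order, and build each group with one filter per key.
import Mathlib
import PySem

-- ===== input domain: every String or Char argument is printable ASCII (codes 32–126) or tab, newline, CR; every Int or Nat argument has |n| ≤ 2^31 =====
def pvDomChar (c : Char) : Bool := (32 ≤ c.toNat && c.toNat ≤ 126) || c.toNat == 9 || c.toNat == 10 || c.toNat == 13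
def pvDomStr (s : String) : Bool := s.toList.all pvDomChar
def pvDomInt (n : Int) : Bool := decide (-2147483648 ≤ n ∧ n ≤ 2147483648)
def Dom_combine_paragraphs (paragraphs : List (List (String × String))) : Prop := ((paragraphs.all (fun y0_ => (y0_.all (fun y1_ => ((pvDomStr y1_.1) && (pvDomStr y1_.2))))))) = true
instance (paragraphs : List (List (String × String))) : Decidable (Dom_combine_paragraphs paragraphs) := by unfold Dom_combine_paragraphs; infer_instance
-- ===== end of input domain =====

-- B replaces A's incremental dict-insert-and-append loop by a flatten-then-group pass (flatten pairs, dedup keys in first-occurrence order, one filter per key); objective: alternative decomposition, same results.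


-- ===== PORT A =====
def combine_paragraphs (paragraphs : List (List (String × String))) : List (String × List String) :=
  (paragraphs.foldl (fun d entry =>
      entry.foldl (fun d p =>
          let d1 := if d.contains p.1 then d else d.insert p.1 []
          d1.modify p.1 [] (fun l => l ++ [p.2])) d)
    (PySem.Dict.empty : PySem.Dict String (List String))).items

-- ===== PORT B =====
def combine_paragraphs_alt (paragraphs : List (List (String × String))) : List (String × List String) :=
  let pairs := paragraphs.flatMap (fun entry => entry)
  let keys := PySem.List.dedup (pairs.map (fun p => p.1))
  keys.map (fun k => (k, (pairs.filter (fun p => p.1 == k)).map (fun p => p.2)))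

-- ===== PRECONDITION & SPEC =====
def Spec_combine_paragraphs (paragraphs : List (List (String × String))) (out : List (String × List String)) : Prop := out = combine_paragraphs_alt paragraphs
instance (paragraphs : List (List (String × String))) (out : List (String × List String)) : Decidable (Spec_combine_paragraphs paragraphs out) := by unfold Spec_combine_paragraphs; infer_instance

-- ===== CLAIM (what is proved, stated in full; the proofs are below) =====
def Claim_equal_combine_paragraphs : Prop := ∀ (paragraphs : List (List (String × String))), Dom_combine_paragraphs paragraphs → Spec_combine_paragraphs paragraphs (combine_paragraphs paragraphs)

-- ===== LEMMAS AND PROOFS =====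

def cpStep (d : PySem.Dict String (List String)) (p : String × String) : PySem.Dict String (List String) :=
  let d1 := if d.contains p.1 then d else d.insert p.1 []
  d1.modify p.1 [] (fun l => l ++ [p.2])

def groupB' (ps : List (String × String)) : List (String × List String) :=
  (PySem.List.dedup (ps.map (fun p => p.1))).map
    (fun k => (k, (ps.filter (fun p => p.1 == k)).map (fun p => p.2)))

theorem map_fst_groupB (ps : List (String × String)) :
    (groupB' ps).map (fun p => p.1) = PySem.List.dedup (ps.map (fun p => p.1)) := by
  rw [groupB', List.map_map]
  exact List.map_id'' (fun _ => rfl) _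

theorem contains_groupB (ps : List (String × String)) (k : String) :
    (PySem.Dict.mk (groupB' ps)).contains k = decide (k ∈ ps.map (fun p => p.1)) := by
  rw [PySem.Dict.contains_eq_decide_mem_keys]
  simp only [PySem.Dict.keys_mk, map_fst_groupB, PySem.List.dedup]
  congr 1
  exact propext (PySem.Set.mem_ofList _ _)

theorem nodup_keys_groupB (ps : List (String × String)) :
    ((PySem.Dict.mk (groupB' ps)).keys).Nodup := by
  show ((groupB' ps).map (fun p => p.1)).Nodup
  rw [map_fst_groupB]
  exact PySem.Set.nodup_ofList _

theorem getD_groupB (ps : List (String × String)) (k : String) (hk : k ∈ ps.map (fun p => p.1)) :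
    (PySem.Dict.mk (groupB' ps)).getD k [] = (ps.filter (fun p => p.1 == k)).map (fun p => p.2) := by
  apply PySem.Dict.getD_of_mem_items (d := PySem.Dict.mk (groupB' ps))
    (k := k) (v := (ps.filter (fun p => p.1 == k)).map (fun p => p.2)) _ (nodup_keys_groupB ps)
  show _ ∈ groupB' ps
  exact List.mem_map.mpr ⟨k, (PySem.Set.mem_ofList _ _).mpr hk, rfl⟩

theorem dedup_snoc (xs : List String) (k : String) :
    PySem.List.dedup (xs ++ [k]) =
      if k ∈ xs then PySem.List.dedup xs else PySem.List.dedup xs ++ [k] := by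
  simp [PySem.List.dedup, PySem.Set.ofList, PySem.Set.add, PySem.Set.contains]
  split_ifs with h1 h2 h3 <;> try rfl
  · exact absurd ((PySem.Set.mem_ofList xs k).mp h1) h2
  · exact absurd ((PySem.Set.mem_ofList xs k).mpr h3) h1

theorem filter_eq_nil_of_not_mem (ps : List (String × String)) (k : String)
    (h : k ∉ ps.map (fun p => p.1)) : ps.filter (fun p => p.1 == k) = [] := by
  rw [List.filter_eq_nil_iff]
  intro p hp
  simp only [beq_iff_eq]
  intro he
  exact h (List.mem_map.mpr ⟨p, hp, he⟩)

theorem step_groupB (ps : List (String × String)) (k : String) (v : String) :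
    cpStep (PySem.Dict.mk (groupB' ps)) (k, v) = PySem.Dict.mk (groupB' (ps ++ [(k, v)])) := by
  by_cases hk : k ∈ ps.map (fun p => p.1)
  · have hc : (PySem.Dict.mk (groupB' ps)).contains k = true := by
      rw [contains_groupB]; simpa using hk
    show cpStep _ _ = _
    simp only [cpStep, hc, if_true, PySem.Dict.modify, PySem.Dict.insert]
    rw [getD_groupB ps k hk]
    congr 1
    unfold groupB'
    rw [List.map_append]
    simp only [List.map_cons, List.map_nil]
    rw [dedup_snoc _ _, if_pos hk, List.map_map]
    apply List.map_congr_left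
    intro k' hk'
    simp only [Function.comp]
    by_cases he : k' = k
    · subst he
      simp [List.filter_append]
    · simp [List.filter_append, he, Ne.symm he]
  · have hc : (PySem.Dict.mk (groupB' ps)).contains k = false := by
      rw [contains_groupB]; simpa using hk
    show cpStep _ _ = _
    simp only [cpStep, hc, Bool.false_eq_true, if_false, PySem.Dict.modify]
    rw [PySem.Dict.getD_insert_self, List.nil_append]
    have h1 : (PySem.Dict.mk (groupB' ps)).insert k [] =
        PySem.Dict.mk (groupB' ps ++ [(k, [])]) := by
      simp only [PySem.Dict.insert, hc, Bool.false_eq_true, if_false]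
    rw [h1]
    have h2 : (PySem.Dict.mk (groupB' ps ++ [(k, [])])).contains k = true := by
      simp [PySem.Dict.contains]
    simp only [PySem.Dict.insert, h2, if_true]
    congr 1
    show (groupB' ps ++ [(k, [])]).map
        (fun (p : String × List String) => if (p.1 == k) = true then (k, [v]) else p) = groupB' (ps ++ [(k, v)])
    rw [List.map_append]
    have h3 : (groupB' ps).map (fun (p : String × List String) => if (p.1 == k) = true then (k, [v]) else p) = groupB' ps := by
      have : ∀ p ∈ groupB' ps, (fun (p : String × List String) => if (p.1 == k) = true then (k, [v]) else p) p = id p := by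
        intro p hp
        have hne : p.1 ≠ k := by
          intro he
          apply hk
          have : p.1 ∈ (groupB' ps).map (fun p => p.1) := List.mem_map.mpr ⟨p, hp, rfl⟩
          rw [map_fst_groupB] at this
          rw [← he]
          exact (PySem.Set.mem_ofList _ _).mp this
        simp [hne]
      rw [List.map_congr_left this, List.map_id]
    rw [h3]
    simp only [List.map_cons, List.map_nil, beq_self_eq_true, if_true]
    unfold groupB'
    rw [List.map_append]
    simp only [List.map_cons, List.map_nil]
    rw [dedup_snoc _ _, if_neg hk, List.map_append]
    congr 1
    · apply List.map_congr_left
      intro k' hk'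
      have hne : k' ≠ k := by
        intro he; subst he
        exact hk ((PySem.Set.mem_ofList _ _).mp hk')
      simp [List.filter_append, Ne.symm hne]
    · simp only [List.map_cons, List.map_nil]
      rw [List.filter_append, filter_eq_nil_of_not_mem ps k hk]
      simp

theorem foldl_step_flatMap (l : List (List (String × String))) (i : PySem.Dict String (List String)) :
    l.foldl (fun d entry => entry.foldl cpStep d) i = (l.flatMap (fun e => e)).foldl cpStep i := by
  induction l generalizing i with
  | nil => rfl
  | cons e t ih => simp [List.foldl_append, ih]

theorem groupB_invariant (ps : List (String × String)) :
    ps.foldl cpStep PySem.Dict.empty = PySem.Dict.mk (groupB' ps) := by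
  induction ps using List.reverseRecOn with
  | nil => rfl
  | append_singleton ps p ih =>
    rw [List.foldl_append, List.foldl_cons, List.foldl_nil, ih]
    obtain ⟨k, v⟩ := p
    exact step_groupB ps k v

-- ===== VERDICT =====
theorem combine_paragraphs_spec : Claim_equal_combine_paragraphs := by
  intro paragraphs _
  show combine_paragraphs paragraphs = combine_paragraphs_alt paragraphs
  unfold combine_paragraphs combine_paragraphs_alt
  have h : (fun (d : PySem.Dict String (List String)) (p : String × String) =>
      let d1 := if d.contains p.1 then d else d.insert p.1 []
      d1.modify p.1 [] (fun l => l ++ [p.2])) = cpStep := rfl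
  simp only [h, foldl_step_flatMap, groupB_invariant]
  rfl
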